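-- pv_equiv track=rewrite | github.com/J05hr/practice_problems | CC_Qs/Pramp/bracket_match.py | bracket_match
-- ===== SOURCE A (Python) =====
-- def bracket_match(text):
--
--     countopen = 0
--     mismatched = 0
--
--     for char in text:
--         if char == '(':
--             countopen += 1
--         else:
--             if countopen == 0:
--                 mismatched += 1
--             else:
--                 countopen -= 1
--
--     mismatched += countopen
--
--     return mismatched
-- ===== SOURCE B (Python) =====
-- def bracket_match(text):
--     bal = 0
--     min_bal = 0
--     for char in text:
--         bal += 1 if char == '(' else -1
--         if bal < min_bal:
--             min_bal = bal
--     return bal - 2 * min_bal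
-- ===== Notes on version B (the rewrite author's own statement) =====
-- stated objective: alternative
-- what changed: Replaces the clamped open-counter plus separate mismatch counter (nested if/else on counter state) by a single signed running balance with its low-water mark, returning bal - 2*min_bal.
import Mathlib
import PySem

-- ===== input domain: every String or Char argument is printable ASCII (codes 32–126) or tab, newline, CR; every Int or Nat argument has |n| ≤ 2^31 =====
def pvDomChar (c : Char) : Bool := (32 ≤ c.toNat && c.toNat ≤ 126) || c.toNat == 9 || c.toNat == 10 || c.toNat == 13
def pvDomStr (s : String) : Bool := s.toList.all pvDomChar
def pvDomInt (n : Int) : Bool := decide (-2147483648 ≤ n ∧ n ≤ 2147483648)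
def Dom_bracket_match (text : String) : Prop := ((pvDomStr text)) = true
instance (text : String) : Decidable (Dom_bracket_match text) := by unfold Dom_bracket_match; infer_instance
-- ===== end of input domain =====

-- B replaces A's clamped open-counter + mismatch counter by a signed running balance with its low-water mark (alternative decomposition, same O(n) cost).


-- ===== PORT A =====
-- loop body of A: nested if/else over (countopen, mismatched)
def fA (st : Int × Int) (char : Char) : Int × Int :=
  if char = '(' then (st.1 + 1, st.2)
  else if st.1 = 0 then (st.1, st.2 + 1)
  else (st.1 - 1, st.2)

def bracket_match (text : String) : Int :=
  let st := text.toList.foldl fA (0, 0)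
  st.2 + st.1

-- ===== PORT B =====
-- B: single signed balance with low-water mark; result = bal - 2*min_bal
-- loop body of B: signed balance and its low-water mark
def fB (st : Int × Int) (char : Char) : Int × Int :=
  let b := st.1 + (if char = '(' then 1 else -1)
  (b, if b < st.2 then b else st.2)

def bracket_match_alt (text : String) : Int :=
  let st := text.toList.foldl fB (0, 0)
  st.1 - 2 * st.2

-- ===== PRECONDITION & SPEC =====
def Spec_bracket_match (text : String) (out : Int) : Prop := out = bracket_match_alt text
instance (text : String) (out : Int) : Decidable (Spec_bracket_match text out) := by unfold Spec_bracket_match; infer_instance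

-- ===== CLAIM (what is proved, stated in full; the proofs are below) =====
def Claim_equal_bracket_match : Prop := ∀ (text : String), Dom_bracket_match text → Spec_bracket_match text (bracket_match text)

-- ===== LEMMAS AND PROOFS =====

-- ===== VERDICT (by name: the statement is the Claim_ definition above) =====
theorem key (l : List Char) : ∀ (co mm bal mb : Int),
    co = bal - mb → mb ≤ bal → mb ≤ 0 → 0 ≤ mm →
    (l.foldl fA (co, mm)).2 + (l.foldl fA (co, mm)).1
      = ((l.foldl fB (bal, mb)).1 - 2 * (l.foldl fB (bal, mb)).2) + mm + mb
    ∧ (l.foldl fB (bal, mb)).2 ≤ 0 := by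
  induction l with
  | nil => intro co mm bal mb h1 h2 h3 h4; simp; constructor <;> omega
  | cons c t ih =>
    intro co mm bal mb h1 h2 h3 h4
    simp only [List.foldl_cons]
    by_cases hc : c = '('
    · simp only [fA, fB, hc, if_pos rfl]
      have hmin : (if bal + 1 < mb then bal + 1 else mb) = mb := by omega
      simp only [reduceIte, hmin]
      exact ih (co + 1) mm (bal + 1) mb (by omega) (by omega) h3 h4
    · simp only [fA, fB, if_neg hc]
      split_ifs with h0 hlt hlt2
      · have := ih co (mm + 1) (bal + -1) (bal + -1) (by omega) le_rfl (by omega) (by omega)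
        omega
      · omega
      · omega
      · have := ih (co - 1) mm (bal + -1) mb (by omega) (by omega) h3 h4
        omega

theorem bracket_match_spec : Claim_equal_bracket_match := by
  intro text _
  simp only [Spec_bracket_match, bracket_match, bracket_match_alt]
  have h := key text.toList 0 0 0 0 rfl le_rfl le_rfl le_rfl
  omega
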